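-- pv_equiv track=rewrite | github.com/mohammadfaiizan/ProjectI | DSA/Problem/Trie/02_Word_Search_Pattern_Matching/1023_Camelcase_Matching.py | camelMatch3
-- ===== SOURCE A (Python) =====
-- from typing import List
--
-- def camelMatch3(queries: List[str], pattern: str) -> List[bool]:
--     """
--     Approach 3: Dynamic Programming
--
--     Use DP to check if query can match pattern.
--
--     Time: O(n * m * p) where n=queries, m=query length, p=pattern length
--     Space: O(m * p) for DP table
--     """
--     def dp_match(query: str, pattern: str) -> bool:
--         """Check match using dynamic programming"""
--         m, p = len(query), len(pattern)
--
--         # dp[i][j] = can query[0:i] match pattern[0:j]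
--         dp = [[False] * (p + 1) for _ in range(m + 1)]
--
--         # Empty pattern matches empty query
--         dp[0][0] = True
--
--         # Fill first column: empty pattern can match lowercase prefix
--         for i in range(1, m + 1):
--             if query[i-1].islower():
--                 dp[i][0] = dp[i-1][0]
--
--         # Fill DP table
--         for i in range(1, m + 1):
--             for j in range(1, p + 1):
--                 if query[i-1] == pattern[j-1]:
--                     # Characters match
--                     dp[i][j] = dp[i-1][j-1]
--                 elif query[i-1].islower():
--                     # Query has extra lowercase - can skip
--                     dp[i][j] = dp[i-1][j]
--                 # else: query has uppercase that doesn't match - stays False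
--
--         return dp[m][p]
--
--     return [dp_match(query, pattern) for query in queries]
-- ===== SOURCE B (Python) =====
-- from typing import List
--
-- def camelMatch3(queries: List[str], pattern: str) -> List[bool]:
--     """Greedy two-pointer subsequence match per query: O(n*(m+p))."""
--     def match(query: str) -> bool:
--         j = 0
--         for c in query:
--             if j < len(pattern) and c == pattern[j]:
--                 j += 1
--             elif not c.islower():
--                 return False
--         return j == len(pattern)
--     return [match(query) for query in queries]
-- ===== Notes on version B (the rewrite author's own statement) =====
-- stated objective: faster
-- what changed: A builds a full (m+1)x(p+1) dynamic-programming table per query; B replaces it with a greedy two-pointer subsequence scan over the query with a single index into the pattern.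
import Mathlib
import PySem

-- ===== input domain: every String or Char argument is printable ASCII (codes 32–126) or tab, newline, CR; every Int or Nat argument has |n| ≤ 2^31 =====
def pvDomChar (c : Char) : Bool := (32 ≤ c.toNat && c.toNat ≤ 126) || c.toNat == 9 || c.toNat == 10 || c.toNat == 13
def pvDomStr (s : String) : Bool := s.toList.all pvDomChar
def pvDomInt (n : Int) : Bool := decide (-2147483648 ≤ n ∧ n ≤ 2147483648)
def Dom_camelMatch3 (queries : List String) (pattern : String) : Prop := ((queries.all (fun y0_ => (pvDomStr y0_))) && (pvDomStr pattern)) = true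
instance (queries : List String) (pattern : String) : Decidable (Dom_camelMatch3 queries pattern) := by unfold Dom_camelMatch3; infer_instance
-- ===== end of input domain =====

-- B replaces A's per-query DP table with a greedy two-pointer subsequence scan; same return values.

-- ===== PORT A =====
-- literal transliteration of A's dp_match: full (m+1)×(p+1) table, column-0 fill, then the double loop
def dpMatchA (query : String) (pattern : String) : Bool :=
  let q := query.toList
  let pt := pattern.toList
  let m := q.length
  let p := pt.length
  -- dp = [[False] * (p + 1) for _ in range(m + 1)]
  let dp0 : List (List Bool) :=
    (PySem.List.pyRange 0 ((m : Int) + 1) 1).map (fun _ => List.replicate (p + 1) false)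
  -- dp[0][0] = True
  let dp1 := PySem.List.pySetD dp0 0
    (PySem.List.pySetD (PySem.List.pyGetD dp0 0 []) 0 true)
  -- for i in range(1, m + 1): if query[i-1].islower(): dp[i][0] = dp[i-1][0]
  let dp2 := (PySem.List.pyRange 1 ((m : Int) + 1) 1).foldl (fun dp i =>
    if PySem.Chars.islower (PySem.List.pyGetD q (i - 1) ' ') then
      PySem.List.pySetD dp i
        (PySem.List.pySetD (PySem.List.pyGetD dp i []) 0
          (PySem.List.pyGetD (PySem.List.pyGetD dp (i - 1) []) 0 false))
    else dp) dp1
  -- for i in range(1, m + 1): for j in range(1, p + 1): match/skip/stay-False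
  let dp3 := (PySem.List.pyRange 1 ((m : Int) + 1) 1).foldl (fun dp i =>
    (PySem.List.pyRange 1 ((p : Int) + 1) 1).foldl (fun dp j =>
      if PySem.List.pyGetD q (i - 1) ' ' = PySem.List.pyGetD pt (j - 1) ' ' then
        PySem.List.pySetD dp i
          (PySem.List.pySetD (PySem.List.pyGetD dp i []) j
            (PySem.List.pyGetD (PySem.List.pyGetD dp (i - 1) []) (j - 1) false))
      else if PySem.Chars.islower (PySem.List.pyGetD q (i - 1) ' ') then
        PySem.List.pySetD dp i
          (PySem.List.pySetD (PySem.List.pyGetD dp i []) j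
            (PySem.List.pyGetD (PySem.List.pyGetD dp (i - 1) []) j false))
      else dp) dp) dp2
  -- return dp[m][p]
  PySem.List.pyGetD (PySem.List.pyGetD dp3 (m : Int) []) (p : Int) false

def camelMatch3 (queries : List String) (pattern : String) : List Bool :=
  queries.map (fun query => dpMatchA query pattern)

-- ===== PORT B =====
-- B's greedy loop: pointer j into pattern, early return False on an unmatched non-lowercase char
def goB (pat : List Char) (j : Nat) : List Char → Bool
  | [] => j == pat.length
  | c :: cs =>
    if j < pat.length ∧ c = pat.getD j ' ' then goB pat (j + 1) cs
    else if PySem.Chars.islower c then goB pat j cs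
    else false

def camelMatch3_alt (queries : List String) (pattern : String) : List Bool :=
  queries.map (fun query => goB pattern.toList 0 query.toList)

-- ===== PRECONDITION & SPEC =====
def Spec_camelMatch3 (queries : List String) (pattern : String) (out : List Bool) : Prop := out = camelMatch3_alt queries pattern
instance (queries : List String) (pattern : String) (out : List Bool) : Decidable (Spec_camelMatch3 queries pattern out) := by unfold Spec_camelMatch3; infer_instance

-- ===== CLAIM (what is proved, stated in full; the proofs are below) =====
def Claim_equal_camelMatch3 : Prop := ∀ (queries : List String) (pattern : String), Dom_camelMatch3 queries pattern → Spec_camelMatch3 queries pattern (camelMatch3 queries pattern)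

-- ===== LEMMAS AND PROOFS =====

-- the cell value dp[i][j] of A's table, as a recursive function
def fdp (q pat : List Char) : Nat → Nat → Bool
  | 0, j => j == 0
  | i + 1, 0 => PySem.Chars.islower (q.getD i ' ') && fdp q pat i 0
  | i + 1, j + 1 =>
    if q.getD i ' ' = pat.getD j ' ' then fdp q pat i j
    else if PySem.Chars.islower (q.getD i ' ') then fdp q pat i (j + 1)
    else false

-- the forced left-to-right matcher on plain lists
def gm : List Char → List Char → Bool
  | [], ps => ps.isEmpty
  | c :: cs, [] => PySem.Chars.islower c && gm cs []
  | c :: cs, p :: ps => if c = p then gm cs ps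
      else if PySem.Chars.islower c then gm cs (p :: ps) else false

-- the relational matcher: pattern is a subsequence, every skipped char lowercase
inductive CMatch : List Char → List Char → Prop
  | nil : CMatch [] []
  | take (c : Char) {cs ps : List Char} : CMatch cs ps → CMatch (c :: cs) (c :: ps)
  | skip (c : Char) {cs ps : List Char} : PySem.Chars.islower c = true → CMatch cs ps →
      CMatch (c :: cs) ps

theorem cmatch_drop_head : ∀ (cs : List Char) {c : Char} {ps : List Char},
    CMatch cs (c :: ps) → PySem.Chars.islower c = true → CMatch cs ps := by
  intro cs
  induction cs with
  | nil => intro c ps h _; cases h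
  | cons c' cs ih =>
    intro c ps h hl
    cases h with
    | take _ h' => exact CMatch.skip _ hl h'
    | skip _ hl' h' => exact CMatch.skip c' hl' (ih h' hl)

theorem gm_of_cmatch_aux : ∀ (cs ps : List Char), CMatch cs ps → gm cs ps = true := by
  intro cs
  induction cs with
  | nil => intro ps h; cases h; rfl
  | cons c cs ih =>
    intro ps h
    cases h with
    | take _ h' => simpa [gm] using ih _ h'
    | skip _ hl h' =>
      cases ps with
      | nil => simpa [gm, hl] using ih _ h'
      | cons p ps' =>
        by_cases hc : c = p
        · subst hc
          simpa [gm] using ih _ (cmatch_drop_head _ h' hl)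
        · simpa [gm, hc, hl] using ih _ h'

theorem cmatch_iff_gm (cs ps : List Char) : gm cs ps = true ↔ CMatch cs ps := by
  constructor
  · induction cs generalizing ps with
    | nil =>
      intro h
      cases ps with
      | nil => exact CMatch.nil
      | cons p ps' => simp [gm] at h
    | cons c cs ih =>
      intro h
      cases ps with
      | nil =>
        simp [gm] at h
        exact CMatch.skip c h.1 (ih _ h.2)
      | cons p ps' =>
        by_cases hc : c = p
        · subst hc
          simp [gm] at h
          exact CMatch.take c (ih _ h)
        · simp [gm, hc] at h
          exact CMatch.skip c h.1 (ih _ h.2)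
  · exact gm_of_cmatch_aux cs ps

theorem cmatch_append_take {cs ps : List Char} (c : Char) (h : CMatch cs ps) :
    CMatch (cs ++ [c]) (ps ++ [c]) := by
  induction h with
  | nil => exact CMatch.take c CMatch.nil
  | take c' _ ih => exact CMatch.take c' ih
  | skip c' hl _ ih => exact CMatch.skip c' hl ih

theorem cmatch_append_skip {cs ps : List Char} (c : Char) (hl : PySem.Chars.islower c = true)
    (h : CMatch cs ps) : CMatch (cs ++ [c]) ps := by
  induction h with
  | nil => exact CMatch.skip c hl CMatch.nil
  | take c' _ ih => exact CMatch.take c' ih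
  | skip c' hl' _ ih => exact CMatch.skip c' hl' ih

theorem cmatch_reverse {cs ps : List Char} (h : CMatch cs ps) :
    CMatch cs.reverse ps.reverse := by
  induction h with
  | nil => exact CMatch.nil
  | take c _ ih => simpa using cmatch_append_take c ih
  | skip c hl _ ih => simpa using cmatch_append_skip c hl ih

theorem gm_reverse (cs ps : List Char) : gm cs.reverse ps.reverse = gm cs ps := by
  rw [Bool.eq_iff_iff, cmatch_iff_gm, cmatch_iff_gm]
  constructor
  · intro h; simpa using cmatch_reverse h
  · exact cmatch_reverse


theorem goB_eq_gm (pat : List Char) : ∀ (cs : List Char) (j : Nat), j ≤ pat.length →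
    goB pat j cs = gm cs (pat.drop j) := by
  intro cs
  induction cs with
  | nil =>
    intro j hj
    rw [goB, gm.eq_def]
    cases hdrop : pat.drop j with
    | nil =>
      have : j = pat.length := by
        have := List.drop_eq_nil_iff.mp hdrop; omega
      simp [this]
    | cons p ps =>
      have : j ≠ pat.length := by
        intro h; rw [h, List.drop_length] at hdrop; cases hdrop
      simp [this]
  | cons c cs ih =>
    intro j hj
    rw [goB]
    by_cases hjl : j < pat.length
    · have hd : pat.drop j = pat[j] :: pat.drop (j + 1) := List.drop_eq_getElem_cons hjl
      have hgd : pat.getD j ' ' = pat[j] := List.getD_eq_getElem pat ' ' hjl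
      rw [hd, gm]
      by_cases hc : c = pat[j]
      · rw [if_pos ⟨hjl, by rw [hgd]; exact hc⟩, if_pos hc]
        exact ih _ (by omega)
      · rw [if_neg (by rw [hgd]; tauto), if_neg hc]
        by_cases hl : PySem.Chars.islower c
        · rw [if_pos hl, if_pos hl, ih _ hj, hd]
        · rw [if_neg hl, if_neg hl]
    · have hj' : j = pat.length := by omega
      have hd : pat.drop j = [] := by rw [hj', List.drop_length]
      rw [hd, gm, if_neg (by omega : ¬ (j < pat.length ∧ c = pat.getD j ' '))]
      by_cases hl : PySem.Chars.islower c
      · rw [if_pos hl, hl, Bool.true_and, ih _ hj, hd]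
      · rw [if_neg hl]
        rw [Bool.not_eq_true] at hl
        rw [hl, Bool.false_and]

theorem fdp_eq_gm (q pat : List Char) : ∀ (i j : Nat), i ≤ q.length → j ≤ pat.length →
    fdp q pat i j = gm ((q.take i).reverse) ((pat.take j).reverse) := by
  intro i
  induction i with
  | zero =>
    intro j hi hj
    rw [fdp, List.take_zero, List.reverse_nil, gm.eq_def]
    cases j with
    | zero => simp
    | succ j' =>
      have h1 : pat.take (j' + 1) = pat.take j' ++ [pat[j']] := by
        rw [List.take_add_one, List.getElem?_eq_getElem (by omega)]; rfl
      rw [h1]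
      simp
      intro h
      subst h
      simp at hj
  | succ i' ih =>
    intro j hi hj
    have hqi : i' < q.length := by omega
    have hq : (q.take (i' + 1)).reverse = q[i'] :: (q.take i').reverse := by
      rw [List.take_add_one, List.getElem?_eq_getElem hqi]
      simp
    have hgq : q.getD i' ' ' = q[i'] := List.getD_eq_getElem q ' ' hqi
    cases j with
    | zero =>
      rw [fdp, hq, List.take_zero, List.reverse_nil, gm, hgq, ih 0 (by omega) (by omega)]
      rw [List.take_zero, List.reverse_nil]
    | succ j' =>
      have hpj : j' < pat.length := by omega
      have hp : (pat.take (j' + 1)).reverse = pat[j'] :: (pat.take j').reverse := by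
        rw [List.take_add_one, List.getElem?_eq_getElem hpj]
        simp
      have hgp : pat.getD j' ' ' = pat[j'] := List.getD_eq_getElem pat ' ' hpj
      rw [fdp, hq, hp, gm, hgq, hgp, ih j' (by omega) (by omega),
        ih (j' + 1) (by omega) (by omega), hp]


-- loop bodies of A's port, named for the invariant lemmas
def body1 (q : List Char) (dp : List (List Bool)) (i : Int) : List (List Bool) :=
  if PySem.Chars.islower (PySem.List.pyGetD q (i - 1) ' ') then
    PySem.List.pySetD dp i
      (PySem.List.pySetD (PySem.List.pyGetD dp i []) 0
        (PySem.List.pyGetD (PySem.List.pyGetD dp (i - 1) []) 0 false))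
  else dp

def bodyJ (q pt : List Char) (i : Int) (dp : List (List Bool)) (j : Int) : List (List Bool) :=
  if PySem.List.pyGetD q (i - 1) ' ' = PySem.List.pyGetD pt (j - 1) ' ' then
    PySem.List.pySetD dp i
      (PySem.List.pySetD (PySem.List.pyGetD dp i []) j
        (PySem.List.pyGetD (PySem.List.pyGetD dp (i - 1) []) (j - 1) false))
  else if PySem.Chars.islower (PySem.List.pyGetD q (i - 1) ' ') then
    PySem.List.pySetD dp i
      (PySem.List.pySetD (PySem.List.pyGetD dp i []) j
        (PySem.List.pyGetD (PySem.List.pyGetD dp (i - 1) []) j false))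
  else dp

def bodyI (q pt : List Char) (dp : List (List Bool)) (i : Int) : List (List Bool) :=
  (PySem.List.pyRange 1 ((pt.length : Int) + 1) 1).foldl (bodyJ q pt i) dp

def rowC (q pt : List Char) (i : Nat) : List Bool :=
  fdp q pt i 0 :: List.replicate pt.length false

def rowF (q pt : List Char) (i : Nat) : List Bool :=
  (List.range (pt.length + 1)).map (fun j => fdp q pt i j)

theorem map_range_congr {α : Type} (n : Nat) (f g : Nat → α) (h : ∀ i, i < n → f i = g i) :
    (List.range n).map f = (List.range n).map g :=
  List.map_congr_left (fun i hi => h i (List.mem_range.mp hi))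

theorem set_map_range {α : Type} (n i : Nat) (f : Nat → α) (v : α) (h : i < n) :
    ((List.range n).map f).set i v = (List.range n).map (fun k => if k = i then v else f k) := by
  apply List.ext_getElem (by simp)
  intro k h1 h2
  simp only [List.getElem_set, List.getElem_map, List.getElem_range]
  by_cases hk : k = i
  · subst hk; simp
  · simp [hk, Ne.symm hk]

theorem rowF_zero (q pt : List Char) : rowF q pt 0 = rowC q pt 0 := by
  unfold rowF rowC
  rw [List.range_succ_eq_map, List.map_cons, List.map_map]
  congr 1
  rw [List.eq_replicate_iff]
  simp [fdp]

theorem partRow_zero (q pt : List Char) (t : Nat) :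
    (List.range (pt.length + 1)).map (fun j => if j ≤ 0 then fdp q pt t j else false)
      = rowC q pt t := by
  unfold rowC
  rw [List.range_succ_eq_map, List.map_cons, List.map_map]
  congr 1
  rw [List.eq_replicate_iff]
  simp

theorem pySetD_zero_cons {α : Type} (x : α) (xs : List α) (v : α) :
    PySem.List.pySetD (x :: xs) 0 v = v :: xs := by
  rw [show (0 : Int) = ((0 : Nat) : Int) by rfl, PySem.List.pySetD_natCast]
  rfl

theorem pyGetD_zero_cons' {α : Type} (x : α) (xs : List α) (d : α) :
    PySem.List.pyGetD (x :: xs) 0 d = x := by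
  rw [show (0 : Int) = ((0 : Nat) : Int) by rfl, PySem.List.pyGetD_natCast]
  rfl

-- first loop: fills column 0
theorem loop1_inv (q pt : List Char) : ∀ (t : Nat), t ≤ q.length →
    (PySem.List.pyRange 1 ((t : Int) + 1) 1).foldl (body1 q)
      ((List.range (q.length + 1)).map (fun i =>
        (if i ≤ 0 then fdp q pt i 0 else false) :: List.replicate pt.length false))
    = (List.range (q.length + 1)).map (fun i =>
        (if i ≤ t then fdp q pt i 0 else false) :: List.replicate pt.length false) := by
  intro t
  induction t with
  | zero => intro _; rw [PySem.List.pyRange_one_eq_nil (by norm_num)]; rfl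
  | succ t ih =>
    intro ht
    have ht' : t ≤ q.length := by omega
    rw [show ((t + 1 : Nat) : Int) + 1 = ((t : Int) + 1) + 1 by push_cast; ring,
      PySem.List.pyRange_one_succ_right (by omega), List.foldl_append, ih ht']
    show body1 q _ _ = _
    unfold body1
    rw [show ((t : Int) + 1 - 1) = ((t : Nat) : Int) by ring,
      show ((t : Int) + 1) = ((t + 1 : Nat) : Int) by push_cast; ring]
    simp only [PySem.List.pyGetD_natCast, PySem.List.pySetD_natCast]
    by_cases hl : PySem.Chars.islower (q.getD t ' ') = true
    · rw [if_pos hl,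
        PySem.List.getD_map_range _ _ _ _ (by omega : t + 1 < q.length + 1),
        PySem.List.getD_map_range _ _ _ _ (by omega : t < q.length + 1),
        if_neg (by omega : ¬ t + 1 ≤ t), if_pos (le_refl t)]
      rw [pyGetD_zero_cons', pySetD_zero_cons,
        set_map_range _ _ _ _ (by omega : t + 1 < q.length + 1)]
      apply map_range_congr
      intro k hk
      by_cases hk1 : k = t + 1
      · subst hk1
        rw [if_pos rfl, if_pos (le_refl _)]
        congr 1
        rw [fdp, hl, Bool.true_and]
      · simp [hk1]
        by_cases hk2 : k ≤ t
        · simp [hk2, show k ≤ t + 1 by omega]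
        · simp [hk2, show ¬ k ≤ t + 1 by omega]
    · rw [if_neg hl]
      apply map_range_congr
      intro k hk
      by_cases hk1 : k = t + 1
      · subst hk1
        rw [if_neg (by omega : ¬ t + 1 ≤ t), if_pos (le_refl _)]
        congr 1
        rw [fdp, Bool.not_eq_true] at *
        rw [hl, Bool.false_and]
      · by_cases hk2 : k ≤ t
        · rw [if_pos hk2, if_pos (by omega : k ≤ t + 1)]
        · rw [if_neg hk2, if_neg (by omega : ¬ k ≤ t + 1)]

-- inner loop: fills row t+1
theorem loop2_inner_inv (q pt : List Char) (t : Nat) (ht : t < q.length) :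
    ∀ (s : Nat), s ≤ pt.length →
    (PySem.List.pyRange 1 ((s : Int) + 1) 1).foldl (bodyJ q pt ((t : Int) + 1))
      ((List.range (q.length + 1)).map (fun i =>
        if i ≤ t then rowF q pt i else rowC q pt i))
    = (List.range (q.length + 1)).map (fun i =>
        if i ≤ t then rowF q pt i
        else if i = t + 1 then
          (List.range (pt.length + 1)).map (fun j => if j ≤ s then fdp q pt i j else false)
        else rowC q pt i) := by
  intro s
  induction s with
  | zero =>
    intro _
    rw [PySem.List.pyRange_one_eq_nil (by norm_num)]
    apply map_range_congr
    intro i hi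
    by_cases h1 : i ≤ t
    · simp [h1]
    · by_cases h2 : i = t + 1
      · subst h2
        rw [if_neg h1, if_neg h1, if_pos rfl, partRow_zero]
      · simp [h1, h2]
  | succ s ih =>
    intro hs
    have hs' : s ≤ pt.length := by omega
    rw [show ((s + 1 : Nat) : Int) + 1 = ((s : Int) + 1) + 1 by push_cast; ring,
      PySem.List.pyRange_one_succ_right (by omega), List.foldl_append, ih hs']
    show bodyJ q pt _ _ _ = _
    unfold bodyJ
    rw [show ((t : Int) + 1 - 1) = ((t : Nat) : Int) by ring,
      show ((s : Int) + 1 - 1) = ((s : Nat) : Int) by ring,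
      show ((t : Int) + 1) = ((t + 1 : Nat) : Int) by push_cast; ring,
      show ((s : Int) + 1) = ((s + 1 : Nat) : Int) by push_cast; ring]
    simp only [PySem.List.pyGetD_natCast, PySem.List.pySetD_natCast]
    rw [PySem.List.getD_map_range _ _ _ _ (by omega : t + 1 < q.length + 1),
      PySem.List.getD_map_range _ _ _ _ (by omega : t < q.length + 1),
      if_neg (by omega : ¬ t + 1 ≤ t), if_pos rfl, if_pos (le_refl t)]
    unfold rowF
    rw [PySem.List.getD_map_range _ _ _ _ (by omega : s < pt.length + 1),
      PySem.List.getD_map_range _ _ _ _ (by omega : s + 1 < pt.length + 1)]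
    by_cases hc : q.getD t ' ' = pt.getD s ' '
    · rw [if_pos hc, set_map_range _ _ _ _ (by omega : s + 1 < pt.length + 1),
        set_map_range _ _ _ _ (by omega : t + 1 < q.length + 1)]
      apply map_range_congr
      intro k hk
      by_cases hk1 : k = t + 1
      · subst hk1
        simp only [if_true, show ¬ (t + 1 ≤ t) from by omega, if_false]
        apply map_range_congr
        intro j hj
        by_cases hj1 : j = s + 1
        · subst hj1
          rw [if_pos rfl, if_pos (le_refl _), fdp, if_pos hc]
        · simp only [if_neg hj1]
          by_cases hj2 : j ≤ s
          · rw [if_pos hj2, if_pos (by omega : j ≤ s + 1)]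
          · rw [if_neg hj2, if_neg (by omega : ¬ j ≤ s + 1)]
      · simp [hk1]
    · rw [if_neg hc]
      by_cases hl : PySem.Chars.islower (q.getD t ' ') = true
      · rw [if_pos hl, set_map_range _ _ _ _ (by omega : s + 1 < pt.length + 1),
          set_map_range _ _ _ _ (by omega : t + 1 < q.length + 1)]
        apply map_range_congr
        intro k hk
        by_cases hk1 : k = t + 1
        · subst hk1
          simp only [if_true, show ¬ (t + 1 ≤ t) from by omega, if_false]
          apply map_range_congr
          intro j hj
          by_cases hj1 : j = s + 1
          · subst hj1
            rw [if_pos rfl, if_pos (le_refl _), fdp, if_neg hc, if_pos hl]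
          · simp only [if_neg hj1]
            by_cases hj2 : j ≤ s
            · rw [if_pos hj2, if_pos (by omega : j ≤ s + 1)]
            · rw [if_neg hj2, if_neg (by omega : ¬ j ≤ s + 1)]
        · simp [hk1]
      · rw [if_neg hl]
        apply map_range_congr
        intro k hk
        by_cases hk1 : k = t + 1
        · subst hk1
          simp only [if_true, show ¬ (t + 1 ≤ t) from by omega, if_false]
          apply map_range_congr
          intro j hj
          by_cases hj1 : j = s + 1
          · subst hj1
            rw [if_neg (by omega : ¬ s + 1 ≤ s), if_pos (le_refl _), fdp, if_neg hc]
            rw [Bool.not_eq_true] at hl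
            rw [hl, if_neg (by simp)]
          · by_cases hj2 : j ≤ s
            · rw [if_pos hj2, if_pos (by omega : j ≤ s + 1)]
            · rw [if_neg hj2, if_neg (by omega : ¬ j ≤ s + 1)]
        · simp [hk1]

-- outer loop
theorem loop2_inv (q pt : List Char) : ∀ (t : Nat), t ≤ q.length →
    (PySem.List.pyRange 1 ((t : Int) + 1) 1).foldl (bodyI q pt)
      ((List.range (q.length + 1)).map (fun i => rowC q pt i))
    = (List.range (q.length + 1)).map (fun i =>
        if i ≤ t then rowF q pt i else rowC q pt i) := by
  intro t
  induction t with
  | zero =>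
    intro _
    rw [PySem.List.pyRange_one_eq_nil (by norm_num)]
    apply map_range_congr
    intro i hi
    by_cases h1 : i ≤ 0
    · have : i = 0 := by omega
      simp [this, rowF_zero]
    · simp [h1]
  | succ t ih =>
    intro ht
    have ht' : t ≤ q.length := by omega
    rw [show ((t + 1 : Nat) : Int) + 1 = ((t : Int) + 1) + 1 by push_cast; ring,
      PySem.List.pyRange_one_succ_right (by omega), List.foldl_append, ih ht']
    show bodyI q pt _ _ = _
    unfold bodyI
    rw [loop2_inner_inv q pt t (by omega) pt.length (le_refl _)]
    apply map_range_congr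
    intro i hi
    by_cases h1 : i ≤ t
    · simp [h1, show i ≤ t + 1 by omega]
    · by_cases h2 : i = t + 1
      · subst h2
        rw [if_neg h1, if_pos rfl, if_pos (le_refl _)]
        unfold rowF
        apply map_range_congr
        intro j hj
        rw [if_pos (by omega : j ≤ pt.length)]
      · simp [h1, h2, show ¬ i ≤ t + 1 by omega]


theorem dp1_eq (q pt : List Char) :
    PySem.List.pySetD
      ((PySem.List.pyRange 0 ((q.length : Int) + 1) 1).map (fun _ => List.replicate (pt.length + 1) false)) 0
      (PySem.List.pySetD
        (PySem.List.pyGetD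
          ((PySem.List.pyRange 0 ((q.length : Int) + 1) 1).map (fun _ => List.replicate (pt.length + 1) false))
          0 []) 0 true)
    = (List.range (q.length + 1)).map (fun i =>
        (if i ≤ 0 then fdp q pt i 0 else false) :: List.replicate pt.length false) := by
  rw [PySem.List.pyRange_one, show (((q.length : Int) + 1) - 0).toNat = q.length + 1 from by omega,
    List.map_map, show (0 : Int) = ((0 : Nat) : Int) from rfl]
  simp only [PySem.List.pyGetD_natCast, PySem.List.pySetD_natCast]
  rw [PySem.List.getD_map_range _ _ _ _ (by omega : 0 < q.length + 1)]
  simp only [Function.comp_apply, List.replicate_succ, List.set_cons_zero]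
  rw [set_map_range _ _ _ _ (by omega : 0 < q.length + 1)]
  apply map_range_congr
  intro k hk
  by_cases h0 : k = 0
  · subst h0
    rw [if_pos rfl, if_pos (le_refl _)]
    simp [fdp]
  · rw [if_neg h0, if_neg (by omega : ¬ k ≤ 0)]
    rfl

theorem start2_eq (q pt : List Char) :
    (List.range (q.length + 1)).map (fun i =>
      (if i ≤ q.length then fdp q pt i 0 else false) :: List.replicate pt.length false)
    = (List.range (q.length + 1)).map (fun i => rowC q pt i) := by
  apply map_range_congr
  intro k hk
  rw [if_pos (by omega : k ≤ q.length)]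
  rfl

theorem dpMatchA_core (q pt : List Char) :
    PySem.List.pyGetD
      (PySem.List.pyGetD
        ((PySem.List.pyRange 1 ((q.length : Int) + 1) 1).foldl (bodyI q pt)
          ((PySem.List.pyRange 1 ((q.length : Int) + 1) 1).foldl (body1 q)
            (PySem.List.pySetD
              ((PySem.List.pyRange 0 ((q.length : Int) + 1) 1).map (fun _ => List.replicate (pt.length + 1) false)) 0
              (PySem.List.pySetD
                (PySem.List.pyGetD
                  ((PySem.List.pyRange 0 ((q.length : Int) + 1) 1).map (fun _ => List.replicate (pt.length + 1) false))
                  0 []) 0 true))))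
        ((q.length : Int)) [])
      ((pt.length : Int)) false = goB pt 0 q := by
  rw [dp1_eq q pt, loop1_inv q pt q.length (le_refl _), start2_eq q pt,
    loop2_inv q pt q.length (le_refl _)]
  simp only [PySem.List.pyGetD_natCast]
  rw [PySem.List.getD_map_range _ _ _ _ (by omega : q.length < q.length + 1), if_pos (le_refl _)]
  unfold rowF
  rw [PySem.List.getD_map_range _ _ _ _ (by omega : pt.length < pt.length + 1)]
  rw [fdp_eq_gm q pt q.length pt.length (le_refl _) (le_refl _), List.take_length,
    List.take_length, gm_reverse, goB_eq_gm pt q 0 (Nat.zero_le _), List.drop_zero]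

theorem dpMatchA_eq (query pattern : String) :
    dpMatchA query pattern = goB pattern.toList 0 query.toList := by
  unfold dpMatchA
  simp only []
  exact dpMatchA_core query.toList pattern.toList

-- ===== VERDICT (by name: the statement is the Claim_ definition above) =====
theorem camelMatch3_spec : Claim_equal_camelMatch3 := by
  intro queries pattern _
  unfold Spec_camelMatch3 camelMatch3 camelMatch3_alt
  exact List.map_congr_left (fun q _ => dpMatchA_eq q pattern)
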